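-- pv_equiv track=rewrite | github.com/KarateMohammed/Network_Automation | Useful_Fun.py | Get_CDP_Neighbors
-- ===== SOURCE A (Python) =====
-- def Get_CDP_Neighbors (CDP_ALL_string="" , Old_IP_list=[],Pattern_Filter_in_CDP='') :
--
-- 	CDP_Lines_List=CDP_ALL_string.splitlines()  # change output to list of lines
-- 	CDP_IPs_List=[]
-- 	New_IPs_list=[]
-- 	# change list of line to list of IPs wihtout IP address sentence
-- 	for i in CDP_Lines_List :
-- 		j=i.lstrip("IP address: ")
-- 		CDP_IPs_List.append(j)
--
-- 	# check on each ip if it's in the mangement range or not and append it to new list if it's not exsit in the IPs list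
-- 	for i in CDP_IPs_List :
-- 		if Pattern_Filter_in_CDP in i :
-- 			# check on the IP to add it to the list
-- 			if i not in Old_IP_list :
-- 				New_IPs_list.append(i)
-- 	New_IPs_list= list(dict.fromkeys(New_IPs_list))
-- 	return New_IPs_list
-- ===== SOURCE B (Python) =====
-- def Get_CDP_Neighbors(CDP_ALL_string="", Old_IP_list=[], Pattern_Filter_in_CDP=''):
--     # Traverse the lines BACK-TO-FRONT; prepend each qualifying stripped line and
--     # purge its later duplicates, so the first occurrence ends up in front.
--     New_IPs_list = []
--     for line in reversed(CDP_ALL_string.splitlines()):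
--         j = line.lstrip("IP address: ")
--         if Pattern_Filter_in_CDP in j and j not in Old_IP_list:
--             New_IPs_list = [j] + [x for x in New_IPs_list if x != j]
--     return New_IPs_list
-- ===== Notes on version B (the rewrite author's own statement) =====
-- stated objective: alternative
-- what changed: B traverses the lines in REVERSE and maintains the answer directly by prepend-and-purge (prepend the qualifying stripped line, delete its later duplicates), so there is no intermediate stripped list, no staged filter pass and no dict.fromkeys/seen-set dedup at all; first-occurrence order falls out of the reversed traversal.
import Mathlib
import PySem

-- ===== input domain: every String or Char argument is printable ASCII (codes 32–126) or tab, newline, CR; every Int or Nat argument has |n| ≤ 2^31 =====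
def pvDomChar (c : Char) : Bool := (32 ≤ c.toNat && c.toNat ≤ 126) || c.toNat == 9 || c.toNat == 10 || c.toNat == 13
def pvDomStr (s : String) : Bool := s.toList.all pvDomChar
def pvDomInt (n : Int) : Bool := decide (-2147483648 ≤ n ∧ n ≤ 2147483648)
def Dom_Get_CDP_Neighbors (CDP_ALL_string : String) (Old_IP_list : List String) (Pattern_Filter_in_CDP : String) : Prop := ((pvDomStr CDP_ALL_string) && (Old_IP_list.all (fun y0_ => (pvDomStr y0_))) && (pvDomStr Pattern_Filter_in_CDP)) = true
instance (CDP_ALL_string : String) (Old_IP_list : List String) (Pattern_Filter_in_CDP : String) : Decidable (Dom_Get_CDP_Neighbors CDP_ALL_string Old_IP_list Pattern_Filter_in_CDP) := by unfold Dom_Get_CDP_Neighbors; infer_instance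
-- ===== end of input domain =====

-- B replaces A's staged passes + dict.fromkeys dedup by a REVERSE traversal that maintains the
-- answer by prepend-and-purge (no intermediate list, no dict/seen set); objective: alternative.

-- str.lstrip(chars): drop leading characters belonging to the chars set (exact port of CPython's lstrip with an argument)
def pyLstrip (s chars : String) : String :=
  String.ofList (s.toList.dropWhile (fun c => chars.toList.contains c))

-- ===== PORT A =====
def Get_CDP_Neighbors (CDP_ALL_string : String) (Old_IP_list : List String) (Pattern_Filter_in_CDP : String) : List String :=
  let CDP_Lines_List := PySem.Str.splitlines CDP_ALL_string
  let CDP_IPs_List := CDP_Lines_List.foldl (fun acc i => acc ++ [pyLstrip i "IP address: "]) []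
  let New_IPs_list := CDP_IPs_List.foldl (fun acc i =>
      if PySem.Str.isIn Pattern_Filter_in_CDP i then
        if !(Old_IP_list.contains i) then acc ++ [i] else acc
      else acc) []
  PySem.List.dedup New_IPs_list

-- ===== PORT B =====
-- one step of B's reversed loop: prepend the qualifying stripped line, purge its later duplicates
def revStep (Old_IP_list : List String) (Pattern_Filter_in_CDP : String)
    (acc : List String) (line : String) : List String :=
  let j := pyLstrip line "IP address: "
  if PySem.Str.isIn Pattern_Filter_in_CDP j && !(Old_IP_list.contains j) then
    j :: acc.filter (fun x => x != j)
  else acc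

def Get_CDP_Neighbors_alt (CDP_ALL_string : String) (Old_IP_list : List String) (Pattern_Filter_in_CDP : String) : List String :=
  ((PySem.Str.splitlines CDP_ALL_string).reverse).foldl (revStep Old_IP_list Pattern_Filter_in_CDP) []

-- ===== PRECONDITION & SPEC =====
def Spec_Get_CDP_Neighbors (CDP_ALL_string : String) (Old_IP_list : List String) (Pattern_Filter_in_CDP : String) (out : List String) : Prop := out = Get_CDP_Neighbors_alt CDP_ALL_string Old_IP_list Pattern_Filter_in_CDP
instance (CDP_ALL_string : String) (Old_IP_list : List String) (Pattern_Filter_in_CDP : String) (out : List String) : Decidable (Spec_Get_CDP_Neighbors CDP_ALL_string Old_IP_list Pattern_Filter_in_CDP out) := by unfold Spec_Get_CDP_Neighbors; infer_instance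

-- ===== CLAIM =====
def Claim_equal_Get_CDP_Neighbors : Prop := ∀ (CDP_ALL_string : String) (Old_IP_list : List String) (Pattern_Filter_in_CDP : String), Dom_Get_CDP_Neighbors CDP_ALL_string Old_IP_list Pattern_Filter_in_CDP → Spec_Get_CDP_Neighbors CDP_ALL_string Old_IP_list Pattern_Filter_in_CDP (Get_CDP_Neighbors CDP_ALL_string Old_IP_list Pattern_Filter_in_CDP)

-- ===== LEMMAS AND PROOFS =====

-- filtering commutes with the Set.add fold (first-occurrence dedup)
theorem filter_foldl_add (p : String → Bool) (t : List String) :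
    ∀ (s : List String), ((t.foldl PySem.Set.add s).filter p) = (t.filter p).foldl PySem.Set.add (s.filter p) := by
  induction t with
  | nil => intro s; rfl
  | cons b t ih =>
    intro s
    simp only [List.foldl_cons, List.filter_cons]
    by_cases hp : p b
    · have hmem : (b ∈ s.filter p) ↔ (b ∈ s) := by simp [List.mem_filter, hp]
      by_cases hb : b ∈ s
      · simp [PySem.Set.add, PySem.Set.contains, hb, hmem.mpr hb, hp, ih]
      · have : b ∉ s.filter p := fun h => hb (hmem.mp h)
        simp [PySem.Set.add, PySem.Set.contains, hb, this, hp, ih, List.filter_append]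
    · by_cases hb : b ∈ s
      · simp [PySem.Set.add, PySem.Set.contains, hb, hp, ih]
      · simp [PySem.Set.add, PySem.Set.contains, hb, hp, ih, List.filter_append]

-- folding Set.add on a state headed by a fresh element a keeps a in front and never re-adds it
theorem foldl_add_cons_notmem (a : String) (t : List String) :
    ∀ (s : List String), a ∉ s →
      t.foldl PySem.Set.add (a :: s) = a :: (t.filter (fun x => x != a)).foldl PySem.Set.add s := by
  induction t with
  | nil => intro s _; rfl
  | cons b t ih =>
    intro s ha
    simp only [List.foldl_cons, List.filter_cons]
    by_cases hba : b = a
    · subst hba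
      simp [PySem.Set.add, PySem.Set.contains, ih s ha]
    · have hne : (b != a) = true := by simp [bne, hba]
      by_cases hb : b ∈ s
      · have : b ∈ a :: s := List.mem_cons_of_mem _ hb
        simp [PySem.Set.add, PySem.Set.contains, this, hb, hne, ih s ha]
      · have hnotc : b ∉ a :: s := by
          intro h; rcases List.mem_cons.mp h with h | h
          · exact hba h
          · exact hb h
        have ha' : a ∉ s ++ [b] := by
          intro h; rcases List.mem_append.mp h with h | h
          · exact ha h
          · exact hba (List.mem_singleton.mp h).symm
        simp [PySem.Set.add, PySem.Set.contains, hnotc, hb, hne, ih (s ++ [b]) ha']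

-- first-occurrence dedup, one step: keep the head, purge its duplicates from the deduped tail
theorem dedup_cons (a : String) (t : List String) :
    PySem.List.dedup (a :: t) = a :: (PySem.List.dedup t).filter (fun x => x != a) := by
  have h1 : PySem.List.dedup (a :: t) = (a :: t).foldl PySem.Set.add [] := by
    rw [PySem.List.dedup_eq_ofList, PySem.Set.ofList_eq_foldl]
  have h2 : PySem.List.dedup t = t.foldl PySem.Set.add [] := by
    rw [PySem.List.dedup_eq_ofList, PySem.Set.ofList_eq_foldl]
  rw [h1, h2]
  have hadd : PySem.Set.add ([] : List String) a = [a] := rfl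
  rw [List.foldl_cons, hadd, foldl_add_cons_notmem a t [] (List.not_mem_nil),
      filter_foldl_add (fun x => x != a) t []]
  rfl

-- B's reversed fold, read as a foldr, computes the dedup of the stripped+filtered lines
theorem rev_foldl_eq_dedup (old : List String) (pat : String) (lines : List String) :
    (lines.reverse).foldl (revStep old pat) []
    = PySem.List.dedup (((lines.map (fun i => pyLstrip i "IP address: ")).filter
          (fun i => PySem.Str.isIn pat i && !(old.contains i)))) := by
  rw [List.foldl_reverse]
  induction lines with
  | nil => rfl
  | cons l t ih =>
    rw [List.foldr_cons, ih]
    simp only [List.map_cons, List.filter_cons, revStep]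
    by_cases h : (PySem.Str.isIn pat (pyLstrip l "IP address: ") && !(old.contains (pyLstrip l "IP address: "))) = true
    · rw [if_pos h, if_pos h, dedup_cons]
    · rw [if_neg h, if_neg h]

-- A's append loop builds the map
theorem foldl_append_map (f : String → String) (xs : List String) :
    xs.foldl (fun acc i => acc ++ [f i]) [] = xs.map f := by
  have h : ∀ (acc : List String), xs.foldl (fun acc i => acc ++ [f i]) acc = acc ++ xs.map f := by
    induction xs with
    | nil => simp
    | cons a t ih => intro acc; simp [ih]
  simpa using h []

-- A's filter loop builds the filter
theorem foldl_if_filter (P : String → Bool) (xs : List String) :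
    xs.foldl (fun acc i => if P i then acc ++ [i] else acc) [] = xs.filter P := by
  have h : ∀ (acc : List String), xs.foldl (fun acc i => if P i then acc ++ [i] else acc) acc = acc ++ xs.filter P := by
    induction xs with
    | nil => simp
    | cons a t ih =>
      intro acc
      by_cases hP : P a <;> simp [hP, ih]
  simpa using h []

-- ===== VERDICT =====
theorem Get_CDP_Neighbors_spec : Claim_equal_Get_CDP_Neighbors := by
  intro s old pat _
  unfold Spec_Get_CDP_Neighbors Get_CDP_Neighbors Get_CDP_Neighbors_alt
  simp only
  rw [rev_foldl_eq_dedup old pat (PySem.Str.splitlines s),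
      foldl_append_map (fun i => pyLstrip i "IP address: ") (PySem.Str.splitlines s)]
  have hsplit : (fun (acc : List String) i =>
      if PySem.Str.isIn pat i then if !(old.contains i) then acc ++ [i] else acc else acc)
      = (fun (acc : List String) i => if (PySem.Str.isIn pat i && !(old.contains i)) then acc ++ [i] else acc) := by
    funext acc i
    cases h1f : PySem.Str.isIn pat i <;> cases h2f : old.contains i <;> simp_all
  rw [hsplit, foldl_if_filter]
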